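-- pv_equiv track=rewrite | github.com/edpypf/PythonCode | Waterloo/2015/PieDay/p5-1.py | distribute_pie
-- ===== SOURCE A (Python) =====
-- def distribute_pie(n, k):
--     total = []
--     queue = [(n, k, [])]  # queue stores remaining pieces of pie, people, and current distribution
--
--     while queue:
--         n, k, curr_dist = queue.pop(0)
--
--         # base case: all pieces have been distributed
--         if n == 0 and k == 0 and sorted(curr_dist) == curr_dist:
--             total.append(curr_dist)
--
--         # recursive case: distribute one piece to the current person and add new state to the queue
--         if n > 0 and k > 0:
--             new_dist = curr_dist + [1]
--             queue.append((n - 1, k - 1, new_dist))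
--
--             # distribute remaining pieces to remaining people and add new states to the queue
--             for i in range(2, n - k + 2):
--                 new_dist = curr_dist + [i]
--                 queue.append((n - i, k - 1, new_dist))
--
--     return total
--
-- n = 8
--
-- k = 4
-- ===== SOURCE B (Python) =====
-- def distribute_pie(n, k):
--     # Directly generate the non-decreasing distributions recursively, in lexicographic order.
--     def helper(remaining, parts, lo):
--         if parts == 0:
--             return [[]] if remaining == 0 else []
--         out = []
--         for v in range(lo, remaining - (parts - 1) + 1):
--             for rest in helper(remaining - v, parts - 1, v):
--                 out.append([v] + rest)
--         return out
--     if k < 0: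
--         return []
--     return helper(n, k, 1)
-- ===== Notes on version B (the rewrite author's own statement) =====
-- stated objective: alternative
-- what changed: A runs a FIFO breadth-first search that enumerates every composition of n into k positive parts and keeps a completed state only if it passes a sortedness check; B directly generates only the non-decreasing distributions with a recursive generator helper(remaining, parts, lo) that bounds each chosen value below by the previous one, emitting the same lists in the same lexicographic order.
import Mathlib
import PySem

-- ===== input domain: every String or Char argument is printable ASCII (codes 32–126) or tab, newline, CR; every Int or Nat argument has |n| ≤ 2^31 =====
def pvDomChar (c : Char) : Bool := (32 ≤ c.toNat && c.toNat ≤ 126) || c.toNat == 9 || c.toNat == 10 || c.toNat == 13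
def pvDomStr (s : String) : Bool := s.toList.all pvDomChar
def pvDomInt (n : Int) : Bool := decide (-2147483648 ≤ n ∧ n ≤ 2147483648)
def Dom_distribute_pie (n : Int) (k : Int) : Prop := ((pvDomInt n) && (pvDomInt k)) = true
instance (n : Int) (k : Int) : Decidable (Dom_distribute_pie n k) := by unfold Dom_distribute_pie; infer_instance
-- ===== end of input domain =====

-- B replaces A's FIFO breadth-first search over all compositions (filtered by a sortedness
-- check at the leaves) with a direct recursive generator of the non-decreasing
-- distributions only; same output, same order.

-- ===== PORT A =====
-- the value appended to `total` when a state is popped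
def pvEmit (n k : Int) (d : List Int) : List (List Int) :=
  if n = 0 ∧ k = 0 ∧ PySem.List.sorted d (fun x => x) false = d then [d] else []

-- the states appended to the queue when a state is popped (1 first, then i = 2 .. n-k+1)
def pvChildren (n k : Int) (d : List Int) : List (Int × Int × List Int) :=
  if n > 0 ∧ k > 0 then
    (n - 1, k - 1, d ++ [1]) ::
      (PySem.List.pyRange 2 (n - k + 2) 1).map (fun i => (n - i, k - 1, d ++ [i]))
  else []

-- termination potential for the queue
def pvPot (s : Int × Int × List Int) : Nat := (s.1.toNat + 2) ^ s.2.1.toNat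

def pvM (q : List (Int × Int × List Int)) : Nat := (q.map pvPot).sum

lemma pvM_append (a b : List (Int × Int × List Int)) : pvM (a ++ b) = pvM a + pvM b := by
  simp [pvM]

lemma pvM_children_lt (n k : Int) (d : List Int) :
    pvM (pvChildren n k d) < pvPot (n, k, d) := by
  by_cases h : n > 0 ∧ k > 0
  · obtain ⟨hn, hk⟩ := h
    set N := n.toNat with hNdef
    set K := k.toNat with hKdef
    have hN : 1 ≤ N := by omega
    have hK : 1 ≤ K := by omega
    have hB : ∀ s ∈ pvChildren n k d, pvPot s ≤ (N + 1) ^ (K - 1) := by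
      intro s hs
      simp only [pvChildren, hn, hk, and_self, if_true, List.mem_cons, List.mem_map] at hs
      rcases hs with hs | ⟨i, hi, hs⟩
      · subst hs
        show ((n - 1).toNat + 2) ^ (k - 1).toNat ≤ (N + 1) ^ (K - 1)
        have e1 : (k - 1).toNat = K - 1 := by omega
        rw [e1]
        exact Nat.pow_le_pow_left (by omega) _
      · subst hs
        have hi' := (PySem.List.mem_pyRange_one.mp hi).1
        show ((n - i).toNat + 2) ^ (k - 1).toNat ≤ (N + 1) ^ (K - 1)
        have e1 : (k - 1).toNat = K - 1 := by omega
        rw [e1]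
        exact Nat.pow_le_pow_left (by omega) _
    have hlen : (pvChildren n k d).length ≤ N := by
      simp only [pvChildren, hn, hk, and_self, if_true, List.length_cons, List.length_map,
        PySem.List.length_pyRange_one]
      omega
    have hsum : pvM (pvChildren n k d) ≤ (pvChildren n k d).length * ((N + 1) ^ (K - 1)) := by
      have := List.sum_le_card_nsmul ((pvChildren n k d).map pvPot) ((N + 1) ^ (K - 1))
        (by intro x hx; simp only [List.mem_map] at hx; obtain ⟨s, hs, rfl⟩ := hx; exact hB s hs)
      simpa [pvM, smul_eq_mul] using this
    have h1 : pvM (pvChildren n k d) ≤ N * ((N + 1) ^ (K - 1)) :=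
      le_trans hsum (Nat.mul_le_mul_right _ hlen)
    have h2 : N * ((N + 1) ^ (K - 1)) < (N + 2) * ((N + 2) ^ (K - 1)) := by
      have hxy : (N + 1) ^ (K - 1) ≤ (N + 2) ^ (K - 1) := Nat.pow_le_pow_left (by omega) _
      have hy : 0 < (N + 2) ^ (K - 1) := by positivity
      nlinarith
    have h3 : (N + 2) * ((N + 2) ^ (K - 1)) = (N + 2) ^ K := by
      rw [← Nat.pow_succ']
      congr 1
      omega
    have : pvPot (n, k, d) = (N + 2) ^ K := rfl
    omega
  · have hc : pvChildren n k d = [] := by simp only [pvChildren, if_neg h]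
    have : 0 < pvPot (n, k, d) := by
      show 0 < (n.toNat + 2) ^ k.toNat
      positivity
    simp [hc, pvM]
    omega

-- the while-loop over the queue, with `total` as accumulator
def pvLoopA : List (Int × Int × List Int) → List (List Int) → List (List Int)
  | [], total => total
  | (n, k, d) :: rest, total =>
      pvLoopA (rest ++ pvChildren n k d) (total ++ pvEmit n k d)
termination_by q _ => pvM q
decreasing_by
  have h := pvM_children_lt n k d
  rw [pvM_append]
  have h2 : pvM ((n, k, d) :: rest) = pvPot (n, k, d) + pvM rest := by
    simp [pvM]
  omega

def distribute_pie (n : Int) (k : Int) : List (List Int) :=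
  pvLoopA [(n, k, [])] []

-- ===== PORT B =====
-- helper(remaining, parts, lo): non-decreasing lists of `parts` values ≥ lo summing to
-- `remaining`, in lexicographic order (parts as a Nat: B only ever calls it with k ≥ 0)
def pvHelperB (remaining : Int) (parts : Nat) (lo : Int) : List (List Int) :=
  match parts with
  | 0 => if remaining = 0 then [[]] else []
  | p + 1 =>
      ((PySem.List.pyRange lo (remaining - (p : Int) + 1) 1).map
        (fun v => (pvHelperB (remaining - v) p v).map (fun rest => v :: rest))).flatten

def distribute_pie_alt (n : Int) (k : Int) : List (List Int) :=
  if k < 0 then [] else pvHelperB n k.toNat 1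

-- ===== PRECONDITION & SPEC =====
def Spec_distribute_pie (n : Int) (k : Int) (out : List (List Int)) : Prop := out = distribute_pie_alt n k
instance (n : Int) (k : Int) (out : List (List Int)) : Decidable (Spec_distribute_pie n k out) := by unfold Spec_distribute_pie; infer_instance

-- ===== CLAIM (what is proved, stated in full; the proofs are below) =====
def Claim_equal_distribute_pie : Prop := ∀ (n : Int) (k : Int), Dom_distribute_pie n k → Spec_distribute_pie n k (distribute_pie n k)

-- ===== LEMMAS AND PROOFS =====

-- outputs of the full BFS subtree rooted at a single state, in emission order
def pvG (n k : Int) (d : List Int) : List (List Int) :=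
  if n = 0 ∧ k = 0 ∧ PySem.List.sorted d (fun x => x) false = d then [d]
  else if h : n > 0 ∧ k > 0 then
    pvG (n - 1) (k - 1) (d ++ [1]) ++
      ((PySem.List.pyRange 2 (n - k + 2) 1).map (fun i => pvG (n - i) (k - 1) (d ++ [i]))).flatten
  else []
termination_by k.toNat
decreasing_by all_goals (have := h.2; omega)

-- pvG applied to a queue entry
def pvGs (s : Int × Int × List Int) : List (List Int) := pvG s.1 s.2.1 s.2.2

lemma pvSorted_of_pairwise (d : List Int) (h : d.Pairwise (· ≤ ·)) :
    PySem.List.sorted d (fun x => x) false = d := by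
  exact PySem.List.sorted_eq_self_of_pairwise _ _ h

lemma pvPairwise_of_sorted (d : List Int) (h : PySem.List.sorted d (fun x => x) false = d) :
    d.Pairwise (· ≤ ·) := by
  have h2 := PySem.List.sorted_pairwise d (fun x => x)
  rw [h] at h2
  simpa using h2

lemma pvG_zero (n : Int) (d : List Int) : pvG n 0 d = pvEmit n 0 d := by
  rw [pvG]
  simp [pvEmit]

lemma pvG_pos (n k : Int) (d : List Int) (hk : 0 < k) :
    pvGs (n, k, d) = ((pvChildren n k d).map pvGs).flatten := by
  show pvG n k d = _
  rw [pvG]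
  by_cases hn : n > 0
  · simp only [pvChildren, hn, hk, and_self, if_true,
      if_neg (by omega : ¬ (n = 0 ∧ k = 0 ∧ PySem.List.sorted d (fun x => x) false = d)),
      List.map_cons, List.flatten_cons, List.map_map]
    rfl
  · simp only [pvChildren, if_neg (by omega : ¬ (n > 0 ∧ k > 0)),
      if_neg (by omega : ¬ (n = 0 ∧ k = 0 ∧ PySem.List.sorted d (fun x => x) false = d)),
      dif_neg (by omega : ¬ (n > 0 ∧ k > 0)), List.map_nil, List.flatten_nil]

lemma pvChildren_level (n k : Int) (d : List Int) :
    ∀ s ∈ pvChildren n k d, s.2.1 = k - 1 := by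
  intro s hs
  by_cases h : n > 0 ∧ k > 0
  · simp only [pvChildren, h.1, h.2, and_self, if_true, List.mem_cons, List.mem_map] at hs
    rcases hs with rfl | ⟨i, _, rfl⟩ <;> rfl
  · simp [pvChildren, if_neg h] at hs

lemma pvL0 : ∀ (q : List (Int × Int × List Int)) (total : List (List Int)),
    (∀ s ∈ q, s.2.1 = 0) →
    pvLoopA q total = total ++ (q.map pvGs).flatten := by
  intro q
  induction q with
  | nil => intro total _; simp [pvLoopA]
  | cons s rest ih =>
    intro total h
    obtain ⟨n, k, d⟩ := s
    have hk : k = 0 := h (n, k, d) List.mem_cons_self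
    subst hk
    have hch : pvChildren n 0 d = [] := by
      simp [pvChildren]
    simp only [pvLoopA, hch, List.append_nil]
    rw [ih _ (fun s hs => h s (List.mem_cons_of_mem _ hs))]
    have : pvGs (n, 0, d) = pvEmit n 0 d := pvG_zero n d
    simp [this, List.append_assoc]

lemma pvLB : ∀ (j : Nat) (q1 q2 : List (Int × Int × List Int)) (total : List (List Int)),
    (∀ s ∈ q1, s.2.1 = (j : Int) + 1) → (∀ s ∈ q2, s.2.1 = (j : Int)) →
    pvLoopA (q1 ++ q2) total = total ++ (q2.map pvGs).flatten ++ (q1.map pvGs).flatten := by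
  intro j
  induction j with
  | zero =>
    intro q1
    induction q1 with
    | nil =>
      intro q2 total _ h2
      rw [List.nil_append, pvL0 q2 total (by simpa using h2)]
      simp
    | cons s rest ih =>
      intro q2 total h1 h2
      obtain ⟨n, k, d⟩ := s
      have hk : k = (0 : Int) + 1 := h1 (n, k, d) List.mem_cons_self
      have hkk : k = 1 := by omega
      subst hkk
      have hemit : pvEmit n 1 d = [] := by simp [pvEmit]
      simp only [List.cons_append, pvLoopA, hemit, List.append_nil, List.append_assoc]
      rw [ih (q2 ++ pvChildren n 1 d) total
        (fun s hs => h1 s (List.mem_cons_of_mem _ hs))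
        (by
          intro s hs
          rcases List.mem_append.mp hs with hs | hs
          · exact h2 s hs
          · have := pvChildren_level n 1 d s hs; omega)]
      simp only [List.map_append, List.flatten_append, List.map_cons, List.flatten_cons,
        List.append_assoc]
      rw [pvG_pos n 1 d (by omega)]
  | succ j' ihj =>
    intro q1
    induction q1 with
    | nil =>
      intro q2 total _ h2
      rw [List.nil_append]
      have h := ihj q2 [] total
        (fun s hs => by have := h2 s hs; push_cast at this ⊢; omega) (by simp)
      simp only [List.append_nil, List.map_nil, List.flatten_nil] at h ⊢
      exact h
    | cons s rest ih =>
      intro q2 total h1 h2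
      obtain ⟨n, k, d⟩ := s
      have hk : k = ((j' + 1 : Nat) : Int) + 1 := h1 (n, k, d) List.mem_cons_self
      have hkpos : 0 < k := by push_cast at hk; omega
      have hemit : pvEmit n k d = [] := by
        simp only [pvEmit, if_neg (by omega : ¬ (n = 0 ∧ k = 0 ∧ PySem.List.sorted d (fun x => x) false = d))]
      simp only [List.cons_append, pvLoopA, hemit, List.append_nil, List.append_assoc]
      rw [ih (q2 ++ pvChildren n k d) total
        (fun s hs => h1 s (List.mem_cons_of_mem _ hs))
        (by
          intro s hs
          rcases List.mem_append.mp hs with hs | hs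
          · exact h2 s hs
          · have := pvChildren_level n k d s hs; push_cast at hk ⊢; omega)]
      simp only [List.map_append, List.flatten_append, List.map_cons, List.flatten_cons,
        List.append_assoc]
      rw [pvG_pos n k d hkpos]

lemma pvG_unsorted : ∀ (K : Nat) (n : Int) (d : List Int),
    ¬ d.Pairwise (· ≤ ·) → pvG n (K : Int) d = [] := by
  intro K
  induction K with
  | zero =>
    intro n d hnp
    rw [pvG]
    have hs : ¬ PySem.List.sorted d (fun x => x) false = d :=
      fun h => hnp (pvPairwise_of_sorted d h)
    simp only [Nat.cast_zero, dif_neg (by omega : ¬ (n > 0 ∧ (0:Int) > 0))]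
    split_ifs with h
    · exact absurd h.2.2 hs
    · rfl
  | succ K' ihK =>
    intro n d hnp
    rw [pvG]
    have hs : ¬ PySem.List.sorted d (fun x => x) false = d :=
      fun h => hnp (pvPairwise_of_sorted d h)
    rw [if_neg (by tauto)]
    have hext : ∀ i : Int, ¬ (d ++ [i]).Pairwise (· ≤ ·) :=
      fun i h => hnp (h.sublist (List.sublist_append_left d [i]))
    have hcast : ((K' + 1 : Nat) : Int) - 1 = (K' : Int) := by push_cast; ring
    by_cases hp : n > 0 ∧ ((K' + 1 : Nat) : Int) > 0
    · rw [dif_pos hp, hcast]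
      rw [ihK (n - 1) (d ++ [1]) (hext 1)]
      rw [List.nil_append, List.flatten_eq_nil_iff.mpr]
      intro l hl
      simp only [List.mem_map] at hl
      obtain ⟨i, _, rfl⟩ := hl
      exact ihK (n - i) (d ++ [i]) (hext i)
    · rw [dif_neg hp]

lemma pvHelperB_nil (K : Nat) (n lo : Int) (hlo : 1 ≤ lo) (hn : n < (K : Int)) :
    pvHelperB n K lo = [] := by
  match K with
  | 0 =>
    rw [pvHelperB]
    simp only [if_neg (by omega : ¬ n = 0)]
  | K' + 1 =>
    rw [pvHelperB]
    rw [PySem.List.pyRange_one_eq_nil (by push_cast at hn ⊢; omega)]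
    simp

lemma pvG_eq_helper : ∀ (K : Nat) (n lo : Int) (d : List Int),
    1 ≤ lo → d.Pairwise (· ≤ ·) → (∀ x ∈ d, x ≤ lo) →
    (d = [] ∧ lo = 1 ∨ d.getLast? = some lo) →
    pvG n (K : Int) d = (pvHelperB n K lo).map (fun c => d ++ c) := by
  intro K
  induction K with
  | zero =>
    intro n lo d hlo hpw hle hlast
    rw [pvG, pvHelperB]
    have hs := pvSorted_of_pairwise d hpw
    by_cases hn0 : n = 0
    · simp [hn0, hs]
    · simp [hn0, hs]
  | succ K' ihK =>
    intro n lo d hlo hpw hle hlast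
    have hcast1 : ((K' + 1 : Nat) : Int) ≠ 0 := by push_cast; omega
    have hcast : ((K' + 1 : Nat) : Int) - 1 = (K' : Int) := by push_cast; ring
    have hU : n - ((K' + 1 : Nat) : Int) + 2 = n - (K' : Int) + 1 := by push_cast; ring
    rw [pvG, pvHelperB]
    rw [if_neg (by tauto)]
    by_cases hn : 0 < n
    · rw [dif_pos ⟨hn, by push_cast; omega⟩, hcast, hU]
      have hterm : ∀ i : Int, lo ≤ i →
          pvG (n - i) (K' : Int) (d ++ [i]) =
            List.map (fun c => d ++ c) (List.map (fun rest => i :: rest) (pvHelperB (n - i) K' i)) := by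
        intro i hi
        rw [ihK (n - i) i (d ++ [i]) (by omega)
          (by
            rw [List.pairwise_append]
            refine ⟨hpw, List.pairwise_singleton _ _, ?_⟩
            intro x hx y hy
            simp only [List.mem_singleton] at hy
            subst hy
            exact le_trans (hle x hx) hi)
          (by
            intro x hx
            rcases List.mem_append.mp hx with h | h
            · exact le_trans (hle x h) hi
            · simp only [List.mem_singleton] at h; omega)
          (Or.inr (by simp))]
        rw [List.map_map]
        apply List.map_congr_left
        intro c _
        simp
      have hdead : ∀ i : Int, 1 ≤ i → i < lo → pvG (n - i) (K' : Int) (d ++ [i]) = [] := by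
        intro i h1 h2
        apply pvG_unsorted
        intro hp
        rcases hlast with ⟨rfl, rfl⟩ | hl
        · omega
        · have hmem : lo ∈ d := List.mem_of_getLast? hl
          rw [List.pairwise_append] at hp
          have := hp.2.2 lo hmem i (by simp)
          omega
      rcases eq_or_lt_of_le hlo with hlo1 | hlo2
      · -- lo = 1
        subst hlo1
        by_cases hU2 : 2 ≤ n - (K' : Int) + 1
        · rw [PySem.List.pyRange_one_cons (show (1:Int) < n - (K' : Int) + 1 by omega)]
          rw [show (1:Int) + 1 = 2 from rfl]
          rw [List.map_cons, List.flatten_cons]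
          rw [List.map_append, List.map_flatten, List.map_map]
          rw [hterm 1 le_rfl]
          congr 1
          · rw [List.map_map]
          · apply congrArg List.flatten
            rw [List.map_map]
            apply List.map_congr_left
            intro i hi
            have hmem := PySem.List.mem_pyRange_one.mp hi
            simpa using hterm i (by omega)
        · rw [PySem.List.pyRange_one_eq_nil (show n - (K' : Int) + 1 ≤ 1 by omega)]
          rw [PySem.List.pyRange_one_eq_nil (show n - (K' : Int) + 1 ≤ 2 by omega)]
          rw [hterm 1 le_rfl, pvHelperB_nil K' (n - 1) 1 le_rfl (by omega)]
          simp
      · -- 2 ≤ lo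
        have hlast' : d.getLast? = some lo := by
          rcases hlast with ⟨_, rfl⟩ | h
          · omega
          · exact h
        rw [hdead 1 (by omega) (by omega), List.nil_append]
        by_cases hUlo : lo ≤ n - (K' : Int) + 1
        · rw [PySem.List.pyRange_one_append 2 lo (n - (K' : Int) + 1) (by omega) hUlo]
          rw [List.map_append, List.flatten_append]
          rw [List.flatten_eq_nil_iff.mpr (by
            intro l hl
            simp only [List.mem_map] at hl
            obtain ⟨i, hi, rfl⟩ := hl
            have hmem := PySem.List.mem_pyRange_one.mp hi
            exact hdead i (by omega) (by omega))]
          rw [List.nil_append, List.map_flatten, List.map_map]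
          apply congrArg List.flatten
          apply List.map_congr_left
          intro i hi
          have hmem := PySem.List.mem_pyRange_one.mp hi
          simpa using hterm i (by omega)
        · rw [PySem.List.pyRange_one_eq_nil (show n - (K' : Int) + 1 ≤ lo by omega)]
          rw [List.flatten_eq_nil_iff.mpr (by
            intro l hl
            simp only [List.mem_map] at hl
            obtain ⟨i, hi, rfl⟩ := hl
            have hmem := PySem.List.mem_pyRange_one.mp hi
            exact hdead i (by omega) (by omega))]
          simp
    · rw [dif_neg (by omega)]
      rw [PySem.List.pyRange_one_eq_nil (show n - (K' : Int) + 1 ≤ lo by omega)]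
      simp

lemma pvMain_loop (n k : Int) : distribute_pie n k = pvG n k [] := by
  unfold distribute_pie
  rcases lt_trichotomy k 0 with hk | hk | hk
  · have hemit : pvEmit n k [] = [] := by
      simp only [pvEmit, if_neg (by omega : ¬ (n = 0 ∧ k = 0 ∧ PySem.List.sorted ([] : List Int) (fun x => x) false = []))]
    have hch : pvChildren n k [] = [] := by
      simp only [pvChildren, if_neg (by omega : ¬ (n > 0 ∧ k > 0))]
    simp only [pvLoopA, hemit, hch, List.append_nil]
    rw [pvG]
    simp only [if_neg (by omega : ¬ (n = 0 ∧ k = 0 ∧ PySem.List.sorted ([] : List Int) (fun x => x) false = [])),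
      dif_neg (by omega : ¬ (n > 0 ∧ k > 0))]
  · subst hk
    rw [pvL0 [(n, 0, [])] [] (by intro s hs; simp at hs; subst hs; rfl)]
    simp [pvGs]
  · have := pvLB (k - 1).toNat [(n, k, [])] [] []
      (by intro s hs; simp at hs; subst hs; show k = _; omega) (by simp)
    simp only [List.append_nil, List.map_nil, List.flatten_nil, List.nil_append, List.map_cons,
      List.flatten_cons] at this
    rw [this]
    simp [pvGs]

lemma pvMain_alt (n k : Int) : pvG n k [] = distribute_pie_alt n k := by
  unfold distribute_pie_alt
  by_cases hk : k < 0
  · rw [if_pos hk, pvG]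
    simp only [if_neg (by omega : ¬ (n = 0 ∧ k = 0 ∧ PySem.List.sorted ([] : List Int) (fun x => x) false = [])),
      dif_neg (by omega : ¬ (n > 0 ∧ k > 0))]
  · rw [if_neg hk]
    have hkk : k = (k.toNat : Int) := by omega
    have h := pvG_eq_helper k.toNat n 1 [] le_rfl (List.Pairwise.nil) (by simp) (Or.inl ⟨rfl, rfl⟩)
    rw [← hkk] at h
    rw [h]
    simp

-- ===== VERDICT (by name: the statement is the Claim_ definition above) =====
theorem distribute_pie_spec : Claim_equal_distribute_pie := by
  intro n k _
  unfold Spec_distribute_pie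
  rw [pvMain_loop, pvMain_alt]
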